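-- pv_equiv track=rewrite | github.com/lahiru-98/flask_chezer | app.py | getAnswersList
-- ===== SOURCE A (Python) =====
-- def getAnswersList(givenAnswers):
--     givenAnswersList  = givenAnswers.split(",")
--     arrlen = len(givenAnswersList)
--     returnlist = []
--     for i in range(0,4):
--         if i<arrlen:
--             returnlist.append(givenAnswersList[i])
--         else:
--             returnlist.append(" ")
--     return returnlist
-- ===== SOURCE B (Python) =====
-- def getAnswersList(givenAnswers):
--     return (givenAnswers.split(",") + [" "] * 4)[:4]
-- ===== Notes on version B (the rewrite author's own statement) =====
-- stated objective: simpler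
-- what changed: Replaces the indexed for-loop with its i<arrlen branch by a single pad-then-truncate expression: split, append four space strings, slice the first four.
import Mathlib
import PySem

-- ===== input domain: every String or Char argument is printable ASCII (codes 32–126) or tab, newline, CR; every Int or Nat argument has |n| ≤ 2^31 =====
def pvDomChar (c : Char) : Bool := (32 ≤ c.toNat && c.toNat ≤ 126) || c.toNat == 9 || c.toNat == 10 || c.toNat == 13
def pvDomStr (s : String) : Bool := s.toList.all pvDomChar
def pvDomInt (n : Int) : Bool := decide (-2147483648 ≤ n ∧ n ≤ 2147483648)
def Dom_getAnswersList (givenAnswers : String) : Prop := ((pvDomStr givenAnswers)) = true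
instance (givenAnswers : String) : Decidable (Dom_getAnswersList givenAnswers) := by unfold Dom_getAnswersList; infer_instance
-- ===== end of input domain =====

-- B replaces A's indexed loop (append split[i] or " " for i in range(4)) by a single
-- pad-then-slice expression (split + four spaces, take the first four); simpler, same cost.


-- ===== PORT A =====
-- literal transliteration: split, then for i in range(0,4) append givenAnswersList[i] if i<arrlen else " "
-- (indexing via pyGet?; the getD " " default is never reached since 0 ≤ i < arrlen there)
def getAnswersList (givenAnswers : String) : List String :=
  let givenAnswersList := (PySem.Str.split? givenAnswers ",").getD []
  let arrlen : Int := givenAnswersList.length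
  (PySem.List.pyRange 0 4 1).foldl
    (fun returnlist i =>
      if i < arrlen then
        returnlist ++ [(PySem.List.pyGet? givenAnswersList i).getD " "]
      else
        returnlist ++ [" "]) []

-- ===== PORT B =====
-- (givenAnswers.split(",") + [" "] * 4)[:4]
def getAnswersList_alt (givenAnswers : String) : List String :=
  PySem.List.slice ((PySem.Str.split? givenAnswers ",").getD [] ++ [" ", " ", " ", " "]) none (some 4)

-- ===== PRECONDITION & SPEC =====
def Spec_getAnswersList (givenAnswers : String) (out : List String) : Prop := out = getAnswersList_alt givenAnswers
instance (givenAnswers : String) (out : List String) : Decidable (Spec_getAnswersList givenAnswers out) := by unfold Spec_getAnswersList; infer_instance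

-- ===== CLAIM (what is proved, stated in full; the proofs are below) =====
def Claim_equal_getAnswersList : Prop := ∀ (givenAnswers : String), Dom_getAnswersList givenAnswers → Spec_getAnswersList givenAnswers (getAnswersList givenAnswers)

-- ===== LEMMAS AND PROOFS =====

-- the core fact, over an arbitrary split list
theorem pad_take_eq (L : List String) :
    (PySem.List.pyRange 0 4 1).foldl
      (fun returnlist i =>
        if i < (L.length : Int) then
          returnlist ++ [(PySem.List.pyGet? L i).getD " "]
        else
          returnlist ++ [" "]) []
    = PySem.List.slice (L ++ [" ", " ", " ", " "]) none (some 4) := by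
  have hr : PySem.List.pyRange 0 4 1 = [0, 1, 2, 3] := by decide
  rw [hr, PySem.List.slice_to _ (by norm_num)]
  match L with
  | [] => decide
  | [a] => simp [List.foldl, PySem.List.pyGet?, PySem.List.pyIdx?]
  | [a, b] => simp [List.foldl, PySem.List.pyGet?, PySem.List.pyIdx?]
  | [a, b, c] => simp [List.foldl, PySem.List.pyGet?, PySem.List.pyIdx?]
  | a :: b :: c :: d :: rest =>
    simp [List.foldl, PySem.List.pyGet?, PySem.List.pyIdx?,
      show (3 : Int) ≤ (rest.length : Int) + 1 + 1 + 1 from by omega,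
      show (2 : Int) ≤ (rest.length : Int) + 1 + 1 + 1 from by omega,
      show (0 : Int) ≤ (rest.length : Int) + 1 + 1 from by omega,
      show (0 : Int) ≤ (rest.length : Int) + 1 + 1 + 1 from by omega]

-- ===== VERDICT (by name: the statement is the Claim_ definition above) =====
theorem getAnswersList_spec : Claim_equal_getAnswersList := by
  intro s _
  unfold Spec_getAnswersList getAnswersList getAnswersList_alt
  exact pad_take_eq _
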